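-- pv_equiv track=rewrite | github.com/pypi-data/pypi-mirror-330 | packages/bio-IGLoo/bio-IGLoo-0.1.0.tar.gz/bio-IGLoo-0.1.0/IGLoo/scripts/analyze_pacbio_refs.py | get_gene_region
-- ===== SOURCE A (Python) =====
-- def get_gene_region(list_gene_name, list_gene_position):
--     """
--     each V, D, J return the maximum region expanded by the genes
--     """
--     dict_region = {"V":[3000000000,0], "D":[3000000000,0], "J":[3000000000,0], "C":[3000000000,0]}
--     for idx, gene_name in enumerate(list_gene_name):
--         if gene_name == "IGHD7-27":
--             continue
--         gene_class = gene_name[3]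
--         if gene_class not in {"V", "D", "J"}:
--             gene_class = "C"
--         gene_region = list_gene_position[idx]
--         if dict_region[gene_class][0] > gene_region[0]:
--             dict_region[gene_class][0] = gene_region[0]
--         if dict_region[gene_class][1] < gene_region[1]:
--             dict_region[gene_class][1] = gene_region[1]
--     return dict_region
-- ===== SOURCE B (Python) =====
-- def _gene_class(name):
--     c = name[3]
--     return c if c in ("V", "D", "J") else "C"
--
--
-- def get_gene_region(list_gene_name, list_gene_position):
--     """
--     each V, D, J return the maximum region expanded by the genes
--     """
--     pairs = [(_gene_class(name), list_gene_position[idx])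
--              for idx, name in enumerate(list_gene_name) if name != "IGHD7-27"]
--     return {c: [min([3000000000] + [r[0] for k, r in pairs if k == c]),
--                 max([0] + [r[1] for k, r in pairs if k == c])]
--             for c in ("V", "D", "J", "C")}
-- ===== Notes on version B (the rewrite author's own statement) =====
-- stated objective: alternative
-- what changed: A maintains running min/max in a mutable 4-key dict inside one loop; B first builds a flat list of (class, region) pairs in a single comprehension and then computes each class's [min, max] by per-class reductions seeded with the sentinels 3000000000 and 0.
import Mathlib
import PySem

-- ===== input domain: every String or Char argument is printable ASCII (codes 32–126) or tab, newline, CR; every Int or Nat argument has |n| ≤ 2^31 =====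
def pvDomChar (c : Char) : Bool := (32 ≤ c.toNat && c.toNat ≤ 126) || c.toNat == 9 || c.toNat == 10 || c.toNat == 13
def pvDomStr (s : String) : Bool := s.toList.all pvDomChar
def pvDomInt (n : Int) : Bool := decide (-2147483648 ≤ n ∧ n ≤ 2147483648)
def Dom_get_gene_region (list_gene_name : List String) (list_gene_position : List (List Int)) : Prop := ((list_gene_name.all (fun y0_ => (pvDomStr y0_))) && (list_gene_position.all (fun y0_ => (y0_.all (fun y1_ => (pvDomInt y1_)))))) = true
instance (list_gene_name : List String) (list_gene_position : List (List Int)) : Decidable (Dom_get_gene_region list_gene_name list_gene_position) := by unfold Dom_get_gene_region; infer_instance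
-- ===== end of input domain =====

-- B groups the (class, region) pairs in one comprehension and then takes per-class min/max
-- reductions (alternative decomposition, same cost); return values only, neither mutates its arguments.

-- ===== PORT A =====
-- A's loop body: the dict update via PySem.Dict.modify; accesses that raise in Python
-- (excluded by Pre_) take an arbitrary default here
def pvAStep (positions : List (List Int)) (d : PySem.Dict String (List Int)) (p : Int × String) :
    PySem.Dict String (List Int) :=
  if p.2 == "IGHD7-27" then d
  else
    let c := (PySem.Str.pyGet? p.2 3).getD ' '
    let gc := if c == 'V' then "V" else if c == 'D' then "D" else if c == 'J' then "J" else "C"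
    let gr := PySem.List.pyGetD positions p.1 []
    let d1 := if PySem.List.pyGetD (d.getD gc []) 0 0 > PySem.List.pyGetD gr 0 0 then
        d.modify gc [] (fun v => PySem.List.pySetD v 0 (PySem.List.pyGetD gr 0 0)) else d
    if PySem.List.pyGetD (d1.getD gc []) 1 0 < PySem.List.pyGetD gr 1 0 then
      d1.modify gc [] (fun v => PySem.List.pySetD v 1 (PySem.List.pyGetD gr 1 0)) else d1

-- the literal initial dict {"V":[3000000000,0], …}
def pvAInit : PySem.Dict String (List Int) :=
  (((PySem.Dict.empty.insert "V" [3000000000, 0]).insert "D" [3000000000, 0]).insert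
      "J" [3000000000, 0]).insert "C" [3000000000, 0]

def get_gene_region (list_gene_name : List String) (list_gene_position : List (List Int)) : List (String × List Int) :=
  ((PySem.List.enumerate list_gene_name 0).foldl (pvAStep list_gene_position) pvAInit).items

-- ===== PORT B =====
-- Source B's helper _gene_class
def pvClass (name : String) : String :=
  let c := (PySem.Str.pyGet? name 3).getD ' '
  if c == 'V' then "V" else if c == 'D' then "D" else if c == 'J' then "J" else "C"

-- Source B's 'pairs' comprehension
def pvPairs (list_gene_name : List String) (list_gene_position : List (List Int)) :
    List (String × List Int) :=
  (PySem.List.enumerate list_gene_name 0).filterMap (fun p =>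
    if p.2 == "IGHD7-27" then none
    else some (pvClass p.2, PySem.List.pyGetD list_gene_position p.1 []))

-- min([a] + xs) / max([a] + xs) on a nonempty Int list are ported as left folds of min/max
-- (exact: Python's first-extremal tie rule is irrelevant on Int values)
def get_gene_region_alt (list_gene_name : List String) (list_gene_position : List (List Int)) : List (String × List Int) :=
  let pairs := pvPairs list_gene_name list_gene_position
  ["V", "D", "J", "C"].map (fun c =>
    (c, [(pairs.filterMap (fun q => if q.1 == c then some (PySem.List.pyGetD q.2 0 0) else none)).foldl min 3000000000,
         (pairs.filterMap (fun q => if q.1 == c then some (PySem.List.pyGetD q.2 1 0) else none)).foldl max 0]))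

-- ===== PRECONDITION & SPEC =====
-- exactly where Python A returns: every non-skipped gene name has at least 4 characters, its
-- index is inside list_gene_position, and that region list has at least 2 entries (else IndexError)
def Pre_get_gene_region (list_gene_name : List String) (list_gene_position : List (List Int)) : Prop :=
  ∀ i ∈ List.range list_gene_name.length,
    list_gene_name.getD i "" ≠ "IGHD7-27" →
      4 ≤ (list_gene_name.getD i "").toList.length ∧ i < list_gene_position.length ∧
        2 ≤ (list_gene_position.getD i []).length
instance (list_gene_name : List String) (list_gene_position : List (List Int)) : Decidable (Pre_get_gene_region list_gene_name list_gene_position) := by unfold Pre_get_gene_region; infer_instance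
def pvWitness_get_gene_region : List String × List (List Int) := (["IGHV1-2", "IGHD7-27", "IGHE"], [[10, 20], [1, 2], [5, 30]])
def Spec_get_gene_region (list_gene_name : List String) (list_gene_position : List (List Int)) (out : List (String × List Int)) : Prop := out = get_gene_region_alt list_gene_name list_gene_position
instance (list_gene_name : List String) (list_gene_position : List (List Int)) (out : List (String × List Int)) : Decidable (Spec_get_gene_region list_gene_name list_gene_position out) := by unfold Spec_get_gene_region; infer_instance

-- ===== CLAIM (what is proved, stated in full; the proofs are below) =====
def Claim_equal_get_gene_region : Prop := ∀ (list_gene_name : List String) (list_gene_position : List (List Int)), Dom_get_gene_region list_gene_name list_gene_position → Pre_get_gene_region list_gene_name list_gene_position → Spec_get_gene_region list_gene_name list_gene_position (get_gene_region list_gene_name list_gene_position)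

-- ===== LEMMAS AND PROOFS =====

-- the loop state of A as a function of its eight live integers
def pvMk4 (v0 v1 d0 d1 j0 j1 c0 c1 : Int) : PySem.Dict String (List Int) :=
  PySem.Dict.mk [("V", [v0, v1]), ("D", [d0, d1]), ("J", [j0, j1]), ("C", [c0, c1])]

-- A's loop body re-expressed on a (class, region) pair
def pvStep2 (d : PySem.Dict String (List Int)) (q : String × List Int) :
    PySem.Dict String (List Int) :=
  let d1 := if PySem.List.pyGetD (d.getD q.1 []) 0 0 > PySem.List.pyGetD q.2 0 0 then
      d.modify q.1 [] (fun v => PySem.List.pySetD v 0 (PySem.List.pyGetD q.2 0 0)) else d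
  if PySem.List.pyGetD (d1.getD q.1 []) 1 0 < PySem.List.pyGetD q.2 1 0 then
    d1.modify q.1 [] (fun v => PySem.List.pySetD v 1 (PySem.List.pyGetD q.2 1 0)) else d1

lemma pvClass_cases (name : String) :
    pvClass name = "V" ∨ pvClass name = "D" ∨ pvClass name = "J" ∨ pvClass name = "C" := by
  simp only [pvClass]
  split_ifs <;> simp

lemma pvFold_eq_fold_pairs (positions : List (List Int)) (names : List String) :
    ∀ (i : Int) (d : PySem.Dict String (List Int)),
      (PySem.List.enumerate names i).foldl (pvAStep positions) d =
        ((PySem.List.enumerate names i).filterMap (fun p =>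
          if p.2 == "IGHD7-27" then none
          else some (pvClass p.2, PySem.List.pyGetD positions p.1 []))).foldl pvStep2 d := by
  induction names with
  | nil => intro i d; simp [PySem.List.enumerate_nil]
  | cons n rest ih =>
    intro i d
    rw [PySem.List.enumerate_cons]
    by_cases h : n = "IGHD7-27"
    · simp [h, pvAStep, ih]
    · have hb : (n == "IGHD7-27") = false := by simpa using h
      have hstep : pvAStep positions d (i, n) =
          pvStep2 d (pvClass n, PySem.List.pyGetD positions i []) := by
        simp only [pvAStep, pvStep2, pvClass, hb, Bool.false_eq_true, if_false]
      simp only [List.foldl_cons, List.filterMap_cons, hb, Bool.false_eq_true, if_false,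
        hstep, ih]

set_option maxHeartbeats 2000000 in
lemma pvStep2_mk4 (k : String) (r : List Int) (v0 v1 d0 d1 j0 j1 c0 c1 : Int)
    (hk : k = "V" ∨ k = "D" ∨ k = "J" ∨ k = "C") :
    pvStep2 (pvMk4 v0 v1 d0 d1 j0 j1 c0 c1) (k, r) =
      (if k = "V" then pvMk4 (min v0 (PySem.List.pyGetD r 0 0)) (max v1 (PySem.List.pyGetD r 1 0)) d0 d1 j0 j1 c0 c1
       else if k = "D" then pvMk4 v0 v1 (min d0 (PySem.List.pyGetD r 0 0)) (max d1 (PySem.List.pyGetD r 1 0)) j0 j1 c0 c1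
       else if k = "J" then pvMk4 v0 v1 d0 d1 (min j0 (PySem.List.pyGetD r 0 0)) (max j1 (PySem.List.pyGetD r 1 0)) c0 c1
       else pvMk4 v0 v1 d0 d1 j0 j1 (min c0 (PySem.List.pyGetD r 0 0)) (max c1 (PySem.List.pyGetD r 1 0))) := by
  rcases hk with h | h | h | h <;> subst h <;>
    · simp only [pvStep2, pvMk4]
      split_ifs <;>
        simp_all [PySem.Dict.modify, PySem.Dict.getD, PySem.Dict.get?, PySem.Dict.insert,
          PySem.Dict.contains, PySem.List.pySetD, PySem.List.pySet?, PySem.List.pyGetD,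
          PySem.List.pyIdx?, List.find?, min_def, max_def] <;> omega

lemma pvFoldPairs_mk4 (pairs : List (String × List Int))
    (hk : ∀ q ∈ pairs, q.1 = "V" ∨ q.1 = "D" ∨ q.1 = "J" ∨ q.1 = "C") :
    ∀ (v0 v1 d0 d1 j0 j1 c0 c1 : Int),
      pairs.foldl pvStep2 (pvMk4 v0 v1 d0 d1 j0 j1 c0 c1) =
        pvMk4
          ((pairs.filterMap (fun q => if q.1 == "V" then some (PySem.List.pyGetD q.2 0 0) else none)).foldl min v0)
          ((pairs.filterMap (fun q => if q.1 == "V" then some (PySem.List.pyGetD q.2 1 0) else none)).foldl max v1)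
          ((pairs.filterMap (fun q => if q.1 == "D" then some (PySem.List.pyGetD q.2 0 0) else none)).foldl min d0)
          ((pairs.filterMap (fun q => if q.1 == "D" then some (PySem.List.pyGetD q.2 1 0) else none)).foldl max d1)
          ((pairs.filterMap (fun q => if q.1 == "J" then some (PySem.List.pyGetD q.2 0 0) else none)).foldl min j0)
          ((pairs.filterMap (fun q => if q.1 == "J" then some (PySem.List.pyGetD q.2 1 0) else none)).foldl max j1)
          ((pairs.filterMap (fun q => if q.1 == "C" then some (PySem.List.pyGetD q.2 0 0) else none)).foldl min c0)
          ((pairs.filterMap (fun q => if q.1 == "C" then some (PySem.List.pyGetD q.2 1 0) else none)).foldl max c1) := by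
  induction pairs with
  | nil => intro v0 v1 d0 d1 j0 j1 c0 c1; simp
  | cons q rest ih =>
    intro v0 v1 d0 d1 j0 j1 c0 c1
    have hq := hk q (by simp)
    have hrest : ∀ x ∈ rest, x.1 = "V" ∨ x.1 = "D" ∨ x.1 = "J" ∨ x.1 = "C" := by
      intro x hx; exact hk x (by simp [hx])
    obtain ⟨k, r⟩ := q
    simp only [List.foldl_cons, List.filterMap_cons]
    rw [pvStep2_mk4 k r _ _ _ _ _ _ _ _ hq]
    rcases hq with h | h | h | h <;> subst h <;> simp [ih hrest]

lemma pvFinal (names : List String) (positions : List (List Int)) :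
    get_gene_region names positions = get_gene_region_alt names positions := by
  unfold get_gene_region get_gene_region_alt
  rw [pvFold_eq_fold_pairs]
  have hinit : pvAInit = pvMk4 3000000000 0 3000000000 0 3000000000 0 3000000000 0 := by decide
  have hkeys : ∀ q ∈ pvPairs names positions,
      q.1 = "V" ∨ q.1 = "D" ∨ q.1 = "J" ∨ q.1 = "C" := by
    intro q hq
    simp only [pvPairs, List.mem_filterMap] at hq
    obtain ⟨p, _, hp⟩ := hq
    split at hp
    · exact absurd hp (by simp)
    · injection hp with hp2
      subst hp2
      simpa using pvClass_cases p.2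
  rw [hinit, show ((PySem.List.enumerate names 0).filterMap (fun p =>
      if p.2 == "IGHD7-27" then none
      else some (pvClass p.2, PySem.List.pyGetD positions p.1 []))) = pvPairs names positions
      from rfl, pvFoldPairs_mk4 _ hkeys]
  simp [pvMk4, List.map]

-- ===== VERDICT (by name: the statement is the Claim_ definition above) =====
theorem get_gene_region_spec : Claim_equal_get_gene_region := by
  intro names positions _ _
  unfold Spec_get_gene_region
  exact pvFinal names positions
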